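-- pv_equiv track=rewrite | github.com/danieldube/cpp_header_guard | src/header_guard/core.py | guard_end_index
-- ===== SOURCE A (Python) =====
-- from typing import Optional, Sequence, Tuple
--
-- COMMENT_ONLY_PREFIXES: Tuple[str, ...] = ("//", "/*", "*", "*/")
--
-- def matches_endif(line: str, name: str) -> bool:
--     """Return ``True`` when *line* closes the guard named *name*."""
--
--     if not line.startswith("#endif"):
--         return False
--     return line == "#endif" or name in line
--
-- def _is_comment_only_line(line: str) -> bool:
--     stripped = line.strip()
--     return bool(stripped) and any(
--         stripped.startswith(prefix) for prefix in COMMENT_ONLY_PREFIXES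
--     )
--
-- def guard_end_index(lines: list[str], name: str) -> Optional[int]:
--     """Return the index of the guard-closing ``#endif`` for *name*.
--
--     Trailing file-level comments are ignored so that guards are still detected
--     when commentary follows the ``#endif`` line.
--     """
--
--     for index in range(len(lines) - 1, -1, -1):
--         stripped = lines[index].strip()
--         if not stripped:
--             continue
--         if _is_comment_only_line(stripped):
--             continue
--         return index if matches_endif(stripped, name) else None
--     return None
-- ===== SOURCE B (Python) =====
-- from typing import Optional
--
-- COMMENT_ONLY_PREFIXES = ("//", "/*", "*", "*/")
--
--
-- def guard_end_index(lines: list[str], name: str) -> Optional[int]: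
--     """Single forward pass: remember the last meaningful (non-blank,
--     non-comment-only) line, then decide once after the loop."""
--     last = None
--     for index, line in enumerate(lines):
--         stripped = line.strip()
--         if stripped and not any(stripped.startswith(p) for p in COMMENT_ONLY_PREFIXES):
--             last = (index, stripped)
--     if last is None:
--         return None
--     index, stripped = last
--     if stripped.startswith("#endif") and (stripped == "#endif" or name in stripped):
--         return index
--     return None
-- ===== Notes on version B (the rewrite author's own statement) =====
-- stated objective: alternative
-- what changed: Replaces A's backward early-return scan with a single forward pass that threads a 'last meaningful line' accumulator and decides the #endif match once after the loop.
import Mathlib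
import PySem

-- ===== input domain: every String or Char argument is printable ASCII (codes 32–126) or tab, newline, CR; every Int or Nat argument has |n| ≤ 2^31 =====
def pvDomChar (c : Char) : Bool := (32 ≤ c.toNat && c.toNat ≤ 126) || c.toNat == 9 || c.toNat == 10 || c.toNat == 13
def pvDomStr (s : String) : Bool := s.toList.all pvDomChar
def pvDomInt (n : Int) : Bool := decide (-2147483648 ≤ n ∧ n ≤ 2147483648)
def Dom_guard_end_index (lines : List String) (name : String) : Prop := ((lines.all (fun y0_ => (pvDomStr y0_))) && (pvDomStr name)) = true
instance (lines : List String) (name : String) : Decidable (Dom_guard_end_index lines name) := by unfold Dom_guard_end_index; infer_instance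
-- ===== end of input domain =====

-- B replaces A's backward early-return scan by a forward pass threading a
-- 'last meaningful line' accumulator, deciding the #endif match once after the loop (objective: alternative).

-- ===== PORT A =====
def pvCommentOnlyPrefixes : List String := ["//", "/*", "*", "*/"]

def pvMatchesEndif (line : String) (name : String) : Bool :=
  if !(PySem.Str.startswith line "#endif") then false
  else line == "#endif" || PySem.Str.isIn name line

def pvIsCommentOnlyLine (line : String) : Bool :=
  let stripped := PySem.Str.strip line
  (!(stripped == "")) && (pvCommentOnlyPrefixes.any (fun p => PySem.Str.startswith stripped p))

-- A's 'for index in range(len(lines)-1, -1, -1)' with early returns, as a countdown recursion: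
-- fuel n means the next index to inspect is n-1.
def pvGuardLoopA (lines : List String) (name : String) : Nat → Option Int
  | 0 => none
  | n + 1 =>
    let stripped := PySem.Str.strip (lines.getD n "")
    if stripped == "" then pvGuardLoopA lines name n
    else if pvIsCommentOnlyLine stripped then pvGuardLoopA lines name n
    else if pvMatchesEndif stripped name then some (n : Int) else none

def guard_end_index (lines : List String) (name : String) : Option Int :=
  pvGuardLoopA lines name lines.length

-- ===== PORT B =====
-- forward pass: remember the last meaningful (non-blank, non-comment-only) line
def pvStepB (acc : Option (Int × String)) (p : Int × String) : Option (Int × String) :=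
  let stripped := PySem.Str.strip p.2
  if (!(stripped == "")) &&
      !(pvCommentOnlyPrefixes.any (fun q => PySem.Str.startswith stripped q))
  then some (p.1, stripped) else acc

def guard_end_index_alt (lines : List String) (name : String) : Option Int :=
  match (PySem.List.enumerate lines).foldl pvStepB none with
  | none => none
  | some (index, stripped) =>
    if PySem.Str.startswith stripped "#endif" &&
        (stripped == "#endif" || PySem.Str.isIn name stripped)
    then some index else none

-- ===== PRECONDITION & SPEC =====
def Spec_guard_end_index (lines : List String) (name : String) (out : Option Int) : Prop := out = guard_end_index_alt lines name
instance (lines : List String) (name : String) (out : Option Int) : Decidable (Spec_guard_end_index lines name out) := by unfold Spec_guard_end_index; infer_instance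

-- ===== CLAIM (what is proved, stated in full; the proofs are below) =====
def Claim_equal_guard_end_index : Prop := ∀ (lines : List String) (name : String), Dom_guard_end_index lines name → Spec_guard_end_index lines name (guard_end_index lines name)

-- ===== LEMMAS AND PROOFS =====

theorem chars_strip_idem (s : List Char) : PySem.Chars.strip (PySem.Chars.strip s) = PySem.Chars.strip s := by
  show List.rdropWhile PySem.Chars.isspace (List.dropWhile PySem.Chars.isspace (List.rdropWhile PySem.Chars.isspace (List.dropWhile PySem.Chars.isspace s))) = _
  set p := PySem.Chars.isspace
  set t := List.dropWhile p s with ht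
  have h1 : List.dropWhile p (List.rdropWhile p t) = List.rdropWhile p t := by
    rcases h : List.rdropWhile p t with _ | ⟨a, as⟩
    · simp
    · have hpre : List.rdropWhile p t <+: t := List.rdropWhile_prefix p t
      rw [h] at hpre
      rcases hpre with ⟨u, hu⟩
      have hta : List.dropWhile p s = a :: (as ++ u) := by rw [← ht]; simpa using hu.symm
      have hpa : ¬ p a := by
        have hne : List.dropWhile p s ≠ [] := by rw [hta]; simp
        have := List.head_dropWhile_not p hne
        simp only [hta, List.head_cons] at this
        simp [this]
      simp [hpa]
  show List.rdropWhile p (List.dropWhile p (List.rdropWhile p t)) = List.rdropWhile p t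
  rw [h1, List.rdropWhile_idempotent]

theorem str_strip_idem (s : String) : PySem.Str.strip (PySem.Str.strip s) = PySem.Str.strip s := by
  rw [← String.toList_inj]
  simp [PySem.Str.toList_strip, chars_strip_idem]

-- B's post-loop decision, named for the induction
def pvFinalizeB (name : String) : Option (Int × String) → Option Int
  | none => none
  | some (index, stripped) =>
    if PySem.Str.startswith stripped "#endif" &&
        (stripped == "#endif" || PySem.Str.isIn name stripped)
    then some index else none

theorem pvLoop_eq (lines : List String) (name : String) :
    ∀ n, n ≤ lines.length →
      pvGuardLoopA lines name n =
        pvFinalizeB name ((PySem.List.enumerate (lines.take n)).foldl pvStepB none) := by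
  intro n
  induction n with
  | zero =>
    intro _
    simp [pvGuardLoopA, PySem.List.enumerate_nil, pvFinalizeB]
  | succ n ih =>
    intro h
    have hn : n < lines.length := h
    have htake : lines.take (n + 1) = lines.take n ++ [lines[n]] := by
      rw [List.take_add_one]
      simp [List.getElem?_eq_getElem hn]
    have hlen : (lines.take n).length = n := by simp [List.length_take]; omega
    have hfold : (PySem.List.enumerate (lines.take (n + 1))).foldl pvStepB none =
        pvStepB ((PySem.List.enumerate (lines.take n)).foldl pvStepB none) ((n : Int), lines[n]) := by
      rw [htake, PySem.List.enumerate_append, List.foldl_append, hlen]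
      simp [PySem.List.enumerate_cons, PySem.List.enumerate_nil]
    have hgetD : lines.getD n "" = lines[n] := List.getD_eq_getElem lines "" hn
    show (let stripped := PySem.Str.strip (lines.getD n "");
      if stripped == "" then pvGuardLoopA lines name n
      else if pvIsCommentOnlyLine stripped then pvGuardLoopA lines name n
      else if pvMatchesEndif stripped name then some (n : Int) else none) = _
    rw [hfold, hgetD]
    set stripped := PySem.Str.strip lines[n] with hs
    by_cases hblank : stripped == ""
    · have hstep : pvStepB ((PySem.List.enumerate (lines.take n)).foldl pvStepB none) ((n : Int), lines[n]) =
          (PySem.List.enumerate (lines.take n)).foldl pvStepB none := by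
        simp [pvStepB, ← hs, hblank]
      rw [hstep]
      simp only [hblank, if_true]
      exact ih (Nat.le_of_succ_le h)
    · by_cases hcom : pvIsCommentOnlyLine stripped
      · have hany : pvCommentOnlyPrefixes.any (fun q => PySem.Str.startswith stripped q) = true := by
          have hb := hcom
          unfold pvIsCommentOnlyLine at hb
          rw [str_strip_idem] at hb
          rw [Bool.and_eq_true] at hb
          exact hb.2
        have hstep : pvStepB ((PySem.List.enumerate (lines.take n)).foldl pvStepB none) ((n : Int), lines[n]) =
            (PySem.List.enumerate (lines.take n)).foldl pvStepB none := by
          simp only [pvStepB, ← hs, hany, Bool.not_true, Bool.and_false]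
          rfl
        rw [hstep]
        simp only [hblank, if_false, hcom, if_true, Bool.false_eq_true]
        exact ih (Nat.le_of_succ_le h)
      · have hany : pvCommentOnlyPrefixes.any (fun q => PySem.Str.startswith stripped q) = false := by
          unfold pvIsCommentOnlyLine at hcom
          rw [str_strip_idem] at hcom
          rcases hval : pvCommentOnlyPrefixes.any (fun q => PySem.Str.startswith stripped q) with _ | _
          · rfl
          · exact absurd (by rw [Bool.and_eq_true]; exact ⟨by simpa using hblank, hval⟩) hcom
        have hstep : pvStepB ((PySem.List.enumerate (lines.take n)).foldl pvStepB none) ((n : Int), lines[n]) =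
            some ((n : Int), stripped) := by
          have hbf : (stripped == "") = false := by simpa using hblank
          simp only [pvStepB, ← hs, hany, hbf, Bool.not_false, Bool.and_true]
          rfl
        rw [hstep]
        simp only [hblank, Bool.false_eq_true, if_false, hcom, if_false]
        unfold pvFinalizeB pvMatchesEndif
        simp

-- ===== VERDICT (by name: the statement is the Claim_ definition above) =====
theorem guard_end_index_spec : Claim_equal_guard_end_index := by
  intro lines name _
  unfold Spec_guard_end_index guard_end_index guard_end_index_alt
  rw [pvLoop_eq lines name lines.length le_rfl, List.take_length]
  rfl
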